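-- pv_equiv track=rewrite | github.com/nicolashainaux/mathmaker | mathmaker/lib/sheet/exercise/question/calculation_modules/priorities_in_calculation_without_parentheses.py | adjust_nb_for_variant_15
-- ===== SOURCE A (Python) =====
-- def adjust_nb_for_variant_15(n1, n2, n3, n4):
--     """
--     Reorder the 4 numbers to ensure a÷b - c÷d >= 0
--
--     May (recursively if needed) change some values by multiplying them
--     by 10 (if there's no other solution).
--     """
--     if n1 >= n3:
--         return (n1, n2, n3, n4)
--     if n1 >= n4:
--         return (n1, n2, n4, n3)
--     if n2 >= n3:
--         return (n2, n1, n3, n4)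
--     if n2 >= n4:
--         return (n2, n1, n4, n3)
--     return adjust_nb_for_variant_15(10 * max(n1, n2), min(n1, n2), n3, n4)
-- ===== SOURCE B (Python) =====
-- def adjust_nb_for_variant_15(n1, n2, n3, n4):
--     """
--     Reorder the 4 numbers to ensure a/b - c/d >= 0.
--
--     Instead of tail recursion re-testing all four guards each round, test the
--     guards once; if none applies, scale max(n1, n2) by 10 in a loop until it
--     reaches min(n3, n4), then decide the final order with a single comparison.
--     """
--     if n1 >= n3:
--         return (n1, n2, n3, n4)
--     if n1 >= n4:
--         return (n1, n2, n4, n3)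
--     if n2 >= n3:
--         return (n2, n1, n3, n4)
--     if n2 >= n4:
--         return (n2, n1, n4, n3)
--     big, small = max(n1, n2), min(n1, n2)
--     target = min(n3, n4)
--     while 10 * big < target:
--         big *= 10
--     big *= 10
--     if big >= n3:
--         return (big, small, n3, n4)
--     return (big, small, n4, n3)
-- ===== Notes on version B (the rewrite author's own statement) =====
-- stated objective: alternative
-- what changed: Replaces the tail recursion (which re-tests all four guards on every round) by testing the guards once, scaling max(n1,n2) by 10 in a simple while loop until it reaches min(n3,n4), and deciding the final order with one comparison.
import Mathlib
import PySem

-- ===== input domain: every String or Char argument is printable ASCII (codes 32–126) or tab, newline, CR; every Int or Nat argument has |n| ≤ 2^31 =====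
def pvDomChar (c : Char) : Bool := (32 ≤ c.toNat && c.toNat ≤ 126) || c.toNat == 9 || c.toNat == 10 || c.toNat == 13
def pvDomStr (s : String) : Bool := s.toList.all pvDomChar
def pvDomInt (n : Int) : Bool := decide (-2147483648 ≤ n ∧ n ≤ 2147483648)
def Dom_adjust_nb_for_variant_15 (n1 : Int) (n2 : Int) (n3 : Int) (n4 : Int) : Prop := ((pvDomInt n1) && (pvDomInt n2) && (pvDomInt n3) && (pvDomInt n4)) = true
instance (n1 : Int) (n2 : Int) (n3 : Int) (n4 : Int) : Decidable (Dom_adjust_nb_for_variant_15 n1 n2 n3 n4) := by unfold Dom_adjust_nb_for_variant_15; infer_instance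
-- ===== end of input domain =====

-- B tests the four guards once, then scales max(n1,n2) by 10 in a plain loop until it
-- reaches min(n3,n4) and decides the final order with one comparison, instead of A's
-- tail recursion that re-tests all four guards each round.


-- ===== PORT A =====
-- A's tail recursion, with a fuel guard making it total; under Pre_ (and Dom_) 12 rounds
-- always suffice, so the fuel branch is never reached on admitted inputs.
def adjA : Nat → Int → Int → Int → Int → Int × Int × Int × Int
  | 0, n1, n2, n3, n4 => (n1, n2, n3, n4)
  | fuel+1, n1, n2, n3, n4 =>
    if n1 ≥ n3 then (n1, n2, n3, n4)
    else if n1 ≥ n4 then (n1, n2, n4, n3)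
    else if n2 ≥ n3 then (n2, n1, n3, n4)
    else if n2 ≥ n4 then (n2, n1, n4, n3)
    else adjA fuel (10 * max n1 n2) (min n1 n2) n3 n4

def adjust_nb_for_variant_15 (n1 : Int) (n2 : Int) (n3 : Int) (n4 : Int) : Int × Int × Int × Int :=
  adjA 12 n1 n2 n3 n4

-- ===== PORT B =====
-- B's while loop, with a fuel guard making it total; 10 rounds always suffice under Pre_ and Dom_.
def growB : Nat → Int → Int → Int
  | 0, a, _ => a
  | fuel+1, a, t => if 10 * a < t then growB fuel (10 * a) t else a

def adjust_nb_for_variant_15_alt (n1 : Int) (n2 : Int) (n3 : Int) (n4 : Int) : Int × Int × Int × Int :=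
  if n1 ≥ n3 then (n1, n2, n3, n4)
  else if n1 ≥ n4 then (n1, n2, n4, n3)
  else if n2 ≥ n3 then (n2, n1, n3, n4)
  else if n2 ≥ n4 then (n2, n1, n4, n3)
  else
    let small := min n1 n2
    let big := 10 * growB 10 (max n1 n2) (min n3 n4)
    if big ≥ n3 then (big, small, n3, n4) else (big, small, n4, n3)

-- ===== PRECONDITION & SPEC =====
-- Pre_ excludes exactly the inputs where A raises RecursionError (max(n1,n2) ≤ 0 and
-- max(n1,n2) < min(n3,n4): the tenfold scaling never grows); B loops forever there.
def Pre_adjust_nb_for_variant_15 (n1 : Int) (n2 : Int) (n3 : Int) (n4 : Int) : Prop :=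
  min n3 n4 ≤ max n1 n2 ∨ 0 < max n1 n2
instance (n1 : Int) (n2 : Int) (n3 : Int) (n4 : Int) : Decidable (Pre_adjust_nb_for_variant_15 n1 n2 n3 n4) := by unfold Pre_adjust_nb_for_variant_15; infer_instance

def pvWitness_adjust_nb_for_variant_15 : Int × Int × Int × Int := (1, 2, 30, 40)

def Spec_adjust_nb_for_variant_15 (n1 : Int) (n2 : Int) (n3 : Int) (n4 : Int) (out : Int × Int × Int × Int) : Prop := out = adjust_nb_for_variant_15_alt n1 n2 n3 n4
instance (n1 : Int) (n2 : Int) (n3 : Int) (n4 : Int) (out : Int × Int × Int × Int) : Decidable (Spec_adjust_nb_for_variant_15 n1 n2 n3 n4 out) := by unfold Spec_adjust_nb_for_variant_15; infer_instance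

-- ===== CLAIM (what is proved, stated in full; the proofs are below) =====
def Claim_equal_adjust_nb_for_variant_15 : Prop := ∀ (n1 : Int) (n2 : Int) (n3 : Int) (n4 : Int), Dom_adjust_nb_for_variant_15 n1 n2 n3 n4 → Pre_adjust_nb_for_variant_15 n1 n2 n3 n4 → Spec_adjust_nb_for_variant_15 n1 n2 n3 n4 (adjust_nb_for_variant_15 n1 n2 n3 n4)

-- ===== LEMMAS AND PROOFS =====

lemma adjA_succ (f : Nat) (n1 n2 n3 n4 : Int) :
    adjA (f+1) n1 n2 n3 n4 =
      (if n1 ≥ n3 then (n1, n2, n3, n4)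
       else if n1 ≥ n4 then (n1, n2, n4, n3)
       else if n2 ≥ n3 then (n2, n1, n3, n4)
       else if n2 ≥ n4 then (n2, n1, n4, n3)
       else adjA f (10 * max n1 n2) (min n1 n2) n3 n4) := rfl

-- Core invariant: once the four guards have failed, A's recursion on (10*a, m) matches
-- B's grow-then-compare, provided fuel is enough to reach min(n3,n4).
lemma adj_loop (n3 n4 m : Int) (hm3 : m < n3) (hm4 : m < n4) :
    ∀ (fuel : Nat) (a : Int), 0 < a → m ≤ a → min n3 n4 ≤ 10 ^ fuel * (10 * a) →
      adjA (fuel+1) (10*a) m n3 n4 =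
        (if 10 * growB fuel a (min n3 n4) ≥ n3
         then (10 * growB fuel a (min n3 n4), m, n3, n4)
         else (10 * growB fuel a (min n3 n4), m, n4, n3)) := by
  intro fuel
  induction fuel with
  | zero =>
    intro a ha hma hfuel
    simp only [pow_zero, one_mul] at hfuel
    rw [adjA_succ]
    simp only [growB]
    split_ifs <;> first | rfl | omega
  | succ f ih =>
    intro a ha hma hfuel
    rw [adjA_succ]
    by_cases h3 : 10 * a ≥ n3
    · have : ¬ 10 * a < min n3 n4 := by omega
      simp only [growB, if_neg this, if_pos h3]
    · by_cases h4 : 10 * a ≥ n4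
      · have : ¬ 10 * a < min n3 n4 := by omega
        simp only [growB, if_neg this, if_neg h3, if_pos h4]
      · have hlt : 10 * a < min n3 n4 := by omega
        have hmax : max (10 * a) m = 10 * a := by omega
        have hmin : min (10 * a) m = m := by omega
        have h3' : ¬ m ≥ n3 := by omega
        have h4' : ¬ m ≥ n4 := by omega
        simp only [if_neg h3, if_neg h4, if_neg h3', if_neg h4', hmax, hmin]
        have hfuel' : min n3 n4 ≤ 10 ^ f * (10 * (10 * a)) := by
          have : (10:Int) ^ (f+1) * (10 * a) = 10 ^ f * (10 * (10 * a)) := by ring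
          omega
        rw [ih (10 * a) (by omega) (by omega) hfuel']
        simp only [growB, if_pos hlt]

-- ===== VERDICT (by name: the statement is the Claim_ definition above) =====
theorem adjust_nb_for_variant_15_spec : Claim_equal_adjust_nb_for_variant_15 := by
  intro n1 n2 n3 n4 hdom hpre
  unfold Spec_adjust_nb_for_variant_15 adjust_nb_for_variant_15 adjust_nb_for_variant_15_alt
  rw [show (12:Nat) = 11+1 from rfl, adjA_succ]
  by_cases h1 : n1 ≥ n3
  · simp [h1]
  by_cases h2 : n1 ≥ n4
  · simp [h1, h2]
  by_cases h3 : n2 ≥ n3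
  · simp [h1, h2, h3]
  by_cases h4 : n2 ≥ n4
  · simp [h1, h2, h3, h4]
  simp only [if_neg h1, if_neg h2, if_neg h3, if_neg h4]
  have hpos : 0 < max n1 n2 := by
    rcases hpre with h | h
    · omega
    · exact h
  have hdom' : n3 ≤ 2147483648 ∧ n4 ≤ 2147483648 := by
    simp only [Dom_adjust_nb_for_variant_15, pvDomInt, Bool.and_eq_true, decide_eq_true_eq] at hdom
    omega
  have hfuel : min n3 n4 ≤ 10 ^ (10:Nat) * (10 * max n1 n2) := by
    have h10 : (10:Int) ^ (10:Nat) = 10000000000 := by norm_num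
    rw [h10]
    rcases min_choice n3 n4 with h | h <;> rw [h] <;> nlinarith [hdom'.1, hdom'.2, hpos]
  rw [show (11:Nat) = 10+1 from rfl,
      adj_loop n3 n4 (min n1 n2) (by omega) (by omega) 10 (max n1 n2) hpos (by omega) hfuel]
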